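-- pv_equiv track=rewrite | github.com/kinorax/comfyui-info-prompt-toolkit | utils/prompt_text.py | _segment_before_colon
-- ===== SOURCE A (Python) =====
-- def _segment_before_colon(text: str, colon_index: int) -> str:
--     end_index = colon_index
--     while end_index > 0 and text[end_index - 1] in " \t":
--         end_index -= 1
--
--     start_index = end_index
--     while start_index > 0 and text[start_index - 1] not in " \t,()\r\n":
--         start_index -= 1
--     return text[start_index:end_index]
-- ===== SOURCE B (Python) =====
-- def _segment_before_colon(text: str, colon_index: int) -> str:
--     # Single forward pass over the prefix: track the current token; a nonpositive
--     # index has nothing before it.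
--     if colon_index <= 0:
--         return ""
--     token = ""
--     after_space = False
--     for ch in text[:colon_index]:
--         if ch in ",()\r\n":
--             token, after_space = "", False
--         elif ch in " \t":
--             after_space = True
--         else:
--             token = ch if after_space else token + ch
--             after_space = False
--     return token
-- ===== Notes on version B (the rewrite author's own statement) =====
-- stated objective: alternative
-- what changed: Replaces A's two backward index scans (strip trailing space/tab, then scan back to a delimiter) with a single forward left-to-right pass over text[:colon_index] that maintains the current token and an after-space flag.
import Mathlib
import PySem

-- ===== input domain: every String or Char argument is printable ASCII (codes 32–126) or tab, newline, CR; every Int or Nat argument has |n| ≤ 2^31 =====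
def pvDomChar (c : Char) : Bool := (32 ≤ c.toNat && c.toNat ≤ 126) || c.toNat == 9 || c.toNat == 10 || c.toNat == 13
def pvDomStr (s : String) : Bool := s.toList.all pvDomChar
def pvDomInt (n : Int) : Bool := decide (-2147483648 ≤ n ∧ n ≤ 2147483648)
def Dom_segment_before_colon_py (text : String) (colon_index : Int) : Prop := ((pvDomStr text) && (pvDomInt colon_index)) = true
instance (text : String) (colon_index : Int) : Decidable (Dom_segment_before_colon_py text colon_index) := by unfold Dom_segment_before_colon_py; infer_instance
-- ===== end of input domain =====

-- B replaces A's two backward index scans by one forward pass over the prefix (alternative decomposition, same cost).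

-- ===== PORT A =====
-- ch in " \t"
def pvIsWs (ch : Char) : Bool := [' ', '\t'].contains ch
-- ch in " \t,()\r\n"
def pvIsDelim (ch : Char) : Bool := [' ', '\t', ',', '(', ')', '\r', '\n'].contains ch

-- while end_index > 0 and text[end_index - 1] in " \t": end_index -= 1
def pvStripWs (cs : List Char) (e : Int) : Int :=
  if h : e > 0 then
    match PySem.List.pyGet? cs (e - 1) with
    | some ch => if pvIsWs ch then pvStripWs cs (e - 1) else e
    | none => e  -- Python raises IndexError here; excluded by Pre_
  else e
termination_by e.toNat
decreasing_by omega

-- while start_index > 0 and text[start_index - 1] not in " \t,()\r\n": start_index -= 1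
def pvStripTok (cs : List Char) (s : Int) : Int :=
  if h : s > 0 then
    match PySem.List.pyGet? cs (s - 1) with
    | some ch => if pvIsDelim ch then s else pvStripTok cs (s - 1)
    | none => s  -- Python raises IndexError here; excluded by Pre_
  else s
termination_by s.toNat
decreasing_by omega

def segment_before_colon_py (text : String) (colon_index : Int) : String :=
  let cs := text.toList
  let e := pvStripWs cs colon_index
  let s := pvStripTok cs e
  String.ofList (PySem.List.slice cs (some s) (some e))

-- ===== PORT B =====
-- the loop body of B's single forward pass, on state (token, after_space)
def pvAltStep (st : List Char × Bool) (ch : Char) : List Char × Bool :=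
  if [',', '(', ')', '\r', '\n'].contains ch then ([], false)
  else if [' ', '\t'].contains ch then (st.1, true)
  else ((if st.2 then [ch] else st.1 ++ [ch]), false)

def segment_before_colon_py_alt (text : String) (colon_index : Int) : String :=
  if colon_index ≤ 0 then ""
  else String.ofList ((PySem.List.slice text.toList none (some colon_index)).foldl pvAltStep ([], false)).1

-- ===== PRECONDITION & SPEC =====
-- A raises IndexError when colon_index exceeds len(text) (it reads text[colon_index-1]); Pre_ excludes exactly those inputs.
def Pre_segment_before_colon_py (text : String) (colon_index : Int) : Prop :=
  colon_index ≤ (text.toList.length : Int)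
instance (text : String) (colon_index : Int) : Decidable (Pre_segment_before_colon_py text colon_index) := by unfold Pre_segment_before_colon_py; infer_instance

def pvWitness_segment_before_colon_py : String × Int := ("a bc:", 4)

def Spec_segment_before_colon_py (text : String) (colon_index : Int) (out : String) : Prop := out = segment_before_colon_py_alt text colon_index
instance (text : String) (colon_index : Int) (out : String) : Decidable (Spec_segment_before_colon_py text colon_index out) := by unfold Spec_segment_before_colon_py; infer_instance

-- ===== CLAIM (what is proved, stated in full; the proofs are below) =====
def Claim_equal_segment_before_colon_py : Prop := ∀ (text : String) (colon_index : Int), Dom_segment_before_colon_py text colon_index → Pre_segment_before_colon_py text colon_index → Spec_segment_before_colon_py text colon_index (segment_before_colon_py text colon_index)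

-- ===== LEMMAS AND PROOFS =====

-- token character: not a delimiter
def pvNd (ch : Char) : Bool := !pvIsDelim ch
-- the segment A extracts from the prefix p: strip trailing ws, then take the token, all on the reversed list
def pvTokOf (p : List Char) : List Char := ((p.reverse.dropWhile pvIsWs).takeWhile pvNd).reverse
-- does p end in a space/tab?
def pvSp (p : List Char) : Bool := match p.reverse with | [] => false | c :: _ => pvIsWs c

theorem pvDelim_chars (ch : Char) (h : ([',', '(', ')', '\r', '\n'].contains ch) = true) :
    pvIsWs ch = false ∧ pvNd ch = false := by
  simp only [List.contains_eq_mem, List.mem_cons, List.not_mem_nil, or_false,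
    decide_eq_true_eq] at h
  rcases h with h | h | h | h | h <;> subst h <;> exact ⟨rfl, rfl⟩

theorem pvWs_chars (ch : Char) (h : pvIsWs ch = true) : pvNd ch = false := by
  simp only [pvIsWs, List.contains_eq_mem, List.mem_cons, List.not_mem_nil, or_false,
    decide_eq_true_eq] at h
  rcases h with h | h <;> subst h <;> rfl

theorem pvNd_of_not (ch : Char) (h1 : ¬ ([',', '(', ')', '\r', '\n'].contains ch) = true)
    (h2 : ¬ pvIsWs ch = true) : pvNd ch = true := by
  simp only [List.contains_eq_mem, List.mem_cons, List.not_mem_nil, or_false,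
    decide_eq_true_eq, pvIsWs] at h1 h2
  simp only [pvNd, pvIsDelim, List.contains_eq_mem, List.mem_cons, List.not_mem_nil, or_false,
    decide_eq_true_eq] at *
  simp_all

theorem pvSp_snoc (q : List Char) (ch : Char) : pvSp (q ++ [ch]) = pvIsWs ch := by
  simp [pvSp, List.reverse_append]

theorem pvTokOf_snoc_delim (q : List Char) (ch : Char) (hw : pvIsWs ch = false)
    (hnd : pvNd ch = false) : pvTokOf (q ++ [ch]) = [] := by
  simp [pvTokOf, List.reverse_append, List.dropWhile_cons, hw, List.takeWhile_cons, hnd]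

theorem pvTokOf_snoc_ws (q : List Char) (ch : Char) (hw : pvIsWs ch = true) :
    pvTokOf (q ++ [ch]) = pvTokOf q := by
  simp [pvTokOf, List.reverse_append, List.dropWhile_cons, hw]

theorem pvTokOf_snoc_tok (q : List Char) (ch : Char) (hw : pvIsWs ch = false)
    (hnd : pvNd ch = true) :
    pvTokOf (q ++ [ch]) = (if pvSp q then [ch] else pvTokOf q ++ [ch]) := by
  rcases hq : q.reverse with _ | ⟨c0, rest⟩
  · simp [pvTokOf, pvSp, List.reverse_append, hq, List.dropWhile_cons, hw,
      List.takeWhile_cons, hnd]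
  · by_cases hc0 : pvIsWs c0 = true
    · have hnd0 : pvNd c0 = false := pvWs_chars c0 hc0
      simp [pvTokOf, pvSp, List.reverse_append, hq, List.dropWhile_cons, hw, hc0,
        List.takeWhile_cons, hnd, hnd0]
    · have hbc0 : pvIsWs c0 = false := by simpa using hc0
      simp [pvTokOf, pvSp, List.reverse_append, hq, List.dropWhile_cons, hw, hbc0,
        List.takeWhile_cons, hnd]

-- B's fold over a prefix p computes (A's extraction from p, "p ends in space/tab")
theorem pvFoldB (p : List Char) : p.foldl pvAltStep ([], false) = (pvTokOf p, pvSp p) := by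
  induction p using List.reverseRecOn with
  | nil => rfl
  | append_singleton q ch ih =>
    rw [List.foldl_append, ih]
    show pvAltStep (pvTokOf q, pvSp q) ch = _
    unfold pvAltStep
    by_cases hd : ([',', '(', ')', '\r', '\n'].contains ch) = true
    · obtain ⟨hw, hnd⟩ := pvDelim_chars ch hd
      rw [if_pos hd, pvTokOf_snoc_delim q ch hw hnd, pvSp_snoc q ch, hw]
    · rw [if_neg hd]
      by_cases hw : pvIsWs ch = true
      · have hw' : ([' ', '\t'].contains ch) = true := hw
        rw [if_pos hw', pvTokOf_snoc_ws q ch hw, pvSp_snoc q ch, hw]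
      · have hnd : pvNd ch = true := pvNd_of_not ch hd hw
        have hw' : ¬ ([' ', '\t'].contains ch) = true := hw
        rw [if_neg hw', pvTokOf_snoc_tok q ch (by simpa using hw) hnd, pvSp_snoc q ch,
          (by simpa using hw : pvIsWs ch = false)]

theorem pv_takeWhile_len_le (f : Char → Bool) (l : List Char) :
    (l.takeWhile f).length ≤ l.length := by
  induction l with
  | nil => simp
  | cons a l ih =>
    by_cases h : f a = true
    · simp only [List.takeWhile_cons, if_pos h, List.length_cons]
      omega
    · simp [List.takeWhile_cons, h]

theorem pv_takeWhile_eq_take (f : Char → Bool) (l : List Char) :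
    l.takeWhile f = l.take (l.takeWhile f).length := by
  induction l with
  | nil => simp
  | cons a l ih =>
    by_cases h : f a = true
    · simp only [List.takeWhile_cons, if_pos h, List.length_cons, List.take_succ_cons]
      exact congrArg (a :: ·) ih
    · simp [List.takeWhile_cons, h]

theorem pv_dropWhile_eq_drop (f : Char → Bool) (l : List Char) :
    l.dropWhile f = l.drop (l.takeWhile f).length := by
  induction l with
  | nil => simp
  | cons a l ih =>
    by_cases h : f a = true
    · simp only [List.dropWhile_cons, List.takeWhile_cons, if_pos h, List.length_cons,
        List.drop_succ_cons]
      exact ih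
    · simp [List.dropWhile_cons, List.takeWhile_cons, h]

theorem pvStripWs_step (cs : List Char) (e : Int) (ch : Char) (hpos : e > 0)
    (hget : PySem.List.pyGet? cs (e - 1) = some ch) :
    pvStripWs cs e = if pvIsWs ch then pvStripWs cs (e - 1) else e := by
  rw [pvStripWs, dif_pos hpos, hget]

theorem pvStripTok_step (cs : List Char) (e : Int) (ch : Char) (hpos : e > 0)
    (hget : PySem.List.pyGet? cs (e - 1) = some ch) :
    pvStripTok cs e = if pvIsDelim ch then e else pvStripTok cs (e - 1) := by
  rw [pvStripTok, dif_pos hpos, hget]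

-- A's first loop: strip trailing spaces/tabs from the first n characters
theorem pvStripWs_spec (cs : List Char) (n : Nat) (hn : n ≤ cs.length) :
    pvStripWs cs (n : Int) = (n : Int) - (((cs.take n).reverse.takeWhile pvIsWs).length : Int) := by
  induction n with
  | zero => rw [pvStripWs]; simp
  | succ n ih =>
    have h1 : ((n + 1 : Nat) : Int) - 1 = (n : Int) := by omega
    have hlt : n < cs.length := by omega
    rw [pvStripWs_step cs ((n + 1 : Nat) : Int) cs[n] (by omega)
      (by rw [h1, PySem.List.pyGet?_natCast, List.getElem?_eq_getElem hlt]), h1]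
    have h2 : (cs.take (n + 1)).reverse = cs[n] :: (cs.take n).reverse := by
      rw [List.take_succ, List.getElem?_eq_getElem hlt]
      simp
    rw [h2, List.takeWhile_cons]
    by_cases hws : pvIsWs cs[n] = true
    · rw [if_pos hws, if_pos hws, ih (by omega), List.length_cons]
      omega
    · rw [if_neg hws, if_neg hws]
      simp

-- A's second loop: scan back over token characters from position n
theorem pvStripTok_spec (cs : List Char) (n : Nat) (hn : n ≤ cs.length) :
    pvStripTok cs (n : Int) = (n : Int) - (((cs.take n).reverse.takeWhile pvNd).length : Int) := by
  induction n with
  | zero => rw [pvStripTok]; simp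
  | succ n ih =>
    have h1 : ((n + 1 : Nat) : Int) - 1 = (n : Int) := by omega
    have hlt : n < cs.length := by omega
    rw [pvStripTok_step cs ((n + 1 : Nat) : Int) cs[n] (by omega)
      (by rw [h1, PySem.List.pyGet?_natCast, List.getElem?_eq_getElem hlt]), h1]
    have h2 : (cs.take (n + 1)).reverse = cs[n] :: (cs.take n).reverse := by
      rw [List.take_succ, List.getElem?_eq_getElem hlt]
      simp
    rw [h2, List.takeWhile_cons]
    by_cases hdl : pvIsDelim cs[n] = true
    · have hnd : pvNd cs[n] = false := by simp [pvNd, hdl]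
      rw [if_pos hdl, hnd, if_neg (by simp)]
      simp
    · have hnd : pvNd cs[n] = true := by simp [pvNd]; simpa using hdl
      rw [if_neg hdl, hnd, if_pos rfl, ih (by omega), List.length_cons]
      omega

-- the slice A returns equals B's extraction pvTokOf on the prefix
theorem pvTok_eq (cs : List Char) (n : Nat) (hn : n ≤ cs.length)
    (w t : Nat) (hw : w = ((cs.take n).reverse.takeWhile pvIsWs).length)
    (ht : t = ((cs.take (n - w)).reverse.takeWhile pvNd).length) :
    (cs.drop (n - w - t)).take t = pvTokOf (cs.take n) := by
  have hplen : (cs.take n).length = n := by simp [List.length_take, hn]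
  have hwle : w ≤ n := by
    have := pv_takeWhile_len_le pvIsWs (cs.take n).reverse
    simp only [List.length_reverse] at this
    omega
  have hqlen : (cs.take (n - w)).length = n - w := by
    simp only [List.length_take]
    omega
  have htle : t ≤ n - w := by
    have := pv_takeWhile_len_le pvNd (cs.take (n - w)).reverse
    simp only [List.length_reverse] at this
    omega
  have htake : cs.take (n - w) = (cs.take n).take (n - w) := by
    rw [List.take_take]
    congr 1
    omega
  -- step 1: dropping the trailing whitespace of (take n) gives (take (n-w)).reverse
  have step1 : (cs.take n).reverse.dropWhile pvIsWs = (cs.take (n - w)).reverse := by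
    rw [pv_dropWhile_eq_drop, ← hw, htake]
    conv_rhs => rw [List.reverse_take]
    rw [hplen]
    congr 1
    omega
  -- step 2: the takeWhile is a take of length t
  have step2 : (cs.take (n - w)).reverse.takeWhile pvNd = (cs.take (n - w)).reverse.take t := by
    rw [ht]
    exact pv_takeWhile_eq_take pvNd (cs.take (n - w)).reverse
  unfold pvTokOf
  rw [step1, step2, List.take_reverse, hqlen, List.reverse_reverse, List.drop_take]
  congr 1
  omega

-- ===== VERDICT (by name: the statement is the Claim_ definition above) =====
theorem segment_before_colon_py_spec : Claim_equal_segment_before_colon_py := by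
  intro text c _ hpre
  unfold Spec_segment_before_colon_py
  unfold Pre_segment_before_colon_py at hpre
  by_cases hc : c ≤ 0
  · have e1 : pvStripWs text.toList c = c := by rw [pvStripWs]; rw [dif_neg (by omega)]
    have e2 : pvStripTok text.toList c = c := by rw [pvStripTok]; rw [dif_neg (by omega)]
    have hsl : PySem.List.slice text.toList (some c) (some c) = ([] : List Char) := by
      apply List.eq_nil_of_length_eq_zero
      rw [PySem.List.length_slice]
      omega
    simp only [segment_before_colon_py, segment_before_colon_py_alt, e1, e2, hsl, if_pos hc]
  · have hcn : c = ((c.toNat : Nat) : Int) := by omega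
    set n := c.toNat with hndef
    have hn : n ≤ text.toList.length := by omega
    have hA := pvStripWs_spec text.toList n hn
    set w := ((text.toList.take n).reverse.takeWhile pvIsWs).length with hwdef
    have hwle : w ≤ n := by
      have := pv_takeWhile_len_le pvIsWs (text.toList.take n).reverse
      simp only [List.length_reverse, List.length_take] at this
      omega
    have he : pvStripWs text.toList c = (((n - w : Nat)) : Int) := by
      rw [hcn, hA]
      omega
    have hn2 : n - w ≤ text.toList.length := by omega
    have hB := pvStripTok_spec text.toList (n - w) hn2
    set t := ((text.toList.take (n - w)).reverse.takeWhile pvNd).length with htdef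
    have htle : t ≤ n - w := by
      have := pv_takeWhile_len_le pvNd (text.toList.take (n - w)).reverse
      simp only [List.length_reverse, List.length_take] at this
      omega
    have hs : pvStripTok text.toList (((n - w : Nat)) : Int) = (((n - w - t : Nat)) : Int) := by
      rw [hB]
      omega
    have hslice : PySem.List.slice text.toList (some (((n - w - t : Nat)) : Int))
        (some (((n - w : Nat)) : Int)) = (text.toList.drop (n - w - t)).take t := by
      rw [PySem.List.slice_natCast]
      congr 1
      omega
    have hbslice : PySem.List.slice text.toList none (some c) = text.toList.take n := by
      rw [hcn, PySem.List.slice_to_natCast]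
    simp only [segment_before_colon_py, segment_before_colon_py_alt, if_neg hc, he, hs, hslice,
      hbslice, pvFoldB]
    rw [pvTok_eq text.toList n hn w t hwdef htdef]
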